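-- pv_equiv track=rewrite | github.com/TiffanyYongNgikChee/grpc-he-benchmark | mnist_training/debug_conv2d.py | avgpool_cyclic
-- ===== SOURCE A (Python) =====
-- SLOT_COUNT = 8192  # OpenFHE BFV default for these params
--
-- def avgpool_cyclic(input_flat, input_h, input_w, pool_size, stride):
--     """Avgpool with cyclic rotation."""
--     out_h = (input_h - pool_size) // stride + 1
--     out_w = (input_w - pool_size) // stride + 1
--     pool_area = pool_size * pool_size
--
--     slots = [0] * SLOT_COUNT
--     for i in range(min(len(input_flat), SLOT_COUNT)):
--         slots[i] = input_flat[i]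
--
--     pool_sum = [0] * SLOT_COUNT
--     for ph in range(pool_size):
--         for pw in range(pool_size):
--             rot = ph * input_w + pw
--             for i in range(SLOT_COUNT):
--                 src = (i + rot) % SLOT_COUNT
--                 pool_sum[i] += slots[src]
--
--     output = [0] * (out_h * out_w)
--     for oh in range(out_h):
--         for ow in range(out_w):
--             src_idx = (oh * stride) * input_w + (ow * stride)
--             dst_idx = oh * out_w + ow
--             if src_idx < SLOT_COUNT:
--                 output[dst_idx] = pool_sum[src_idx] // pool_area
--
--     return output, out_h, out_w
-- ===== SOURCE B (Python) =====
-- SLOT_COUNT = 8192  # OpenFHE BFV default for these params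
--
--
-- def avgpool_cyclic(input_flat, input_h, input_w, pool_size, stride):
--     """Avgpool with cyclic rotation: each output cell is the cyclic window
--     sum at its source slot, built as one flat comprehension over the output
--     grid -- no 8192-slot pool_sum vector and no preallocated output array."""
--     out_h = (input_h - pool_size) // stride + 1
--     out_w = (input_w - pool_size) // stride + 1
--     area = pool_size * pool_size
--     n = len(input_flat)
--
--     def slot(i):
--         j = i % SLOT_COUNT
--         return input_flat[j] if j < n else 0
--
--     def cell(oh, ow):
--         src = oh * stride * input_w + ow * stride
--         if src >= SLOT_COUNT:
--             return 0
--         window = [slot(src + ph * input_w + pw)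
--                   for ph in range(pool_size)
--                   for pw in range(pool_size)]
--         return sum(window) // area
--
--     output = [cell(oh, ow) for oh in range(out_h) for ow in range(out_w)]
--     return output, out_h, out_w
-- ===== Notes on version B (the rewrite author's own statement) =====
-- stated objective: faster
-- what changed: B drops A's full 8192-slot cyclic pool_sum vector (pool_size^2 passes over all slots) and its preallocated output array, and instead builds the output as one flat comprehension whose cells sum their cyclic pool window directly at the needed source slot.
-- intended difference: On inputs where both computed output dimensions are negative (out_h<0 and out_w<0), A returns a list of out_h*out_w zeros - an accident of allocating [0]*(out_h*out_w) with a positive product of two negative dims while its fill loops never run - whereas B returns the empty list, the intended output for an empty output grid. — e.g. on avgpool_cyclic([], -2, -2, 0, 1): A returns ([0], -1, -1), B returns ([], -1, -1)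
import Mathlib
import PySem

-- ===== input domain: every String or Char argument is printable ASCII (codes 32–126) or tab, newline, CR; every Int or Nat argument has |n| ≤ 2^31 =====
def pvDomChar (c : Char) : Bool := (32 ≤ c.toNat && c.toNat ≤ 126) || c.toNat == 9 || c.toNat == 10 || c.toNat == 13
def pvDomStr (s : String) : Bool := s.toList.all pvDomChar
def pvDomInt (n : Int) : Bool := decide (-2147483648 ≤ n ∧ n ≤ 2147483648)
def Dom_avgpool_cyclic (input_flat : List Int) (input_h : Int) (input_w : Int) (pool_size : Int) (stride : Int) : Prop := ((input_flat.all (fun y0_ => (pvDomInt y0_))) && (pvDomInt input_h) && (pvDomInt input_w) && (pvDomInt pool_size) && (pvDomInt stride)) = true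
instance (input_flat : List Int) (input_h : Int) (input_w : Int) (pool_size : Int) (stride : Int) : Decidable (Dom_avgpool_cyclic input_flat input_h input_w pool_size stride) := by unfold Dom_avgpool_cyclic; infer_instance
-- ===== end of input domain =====

-- B replaces A's full 8192-slot cyclic pool_sum accumulation and preallocated output array
-- by one flat comprehension over the output grid summing each pool window directly (faster);
-- B intentionally returns [] (not a zero list) when both output dims are negative, see D_ below.


-- ===== PORT A =====
-- slots = [0]*8192; slots[i] = input_flat[i] for i in range(min(len, 8192))
def pvSlotsA (input_flat : List Int) : Array Int :=
  (List.range (min input_flat.length 8192)).foldl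
    (fun (a : Array Int) (i : Nat) => a.setIfInBounds i (input_flat.getD i 0)) (Array.replicate 8192 0)

-- pool_sum loop of A: for ph, for pw, rot = ph*w+pw, pool_sum[i] += slots[(i+rot) % 8192]
def pvPoolSum (slots : Array Int) (w : Int) (p : Int) : Array Int :=
  (List.range p.toNat).foldl (fun (ps : Array Int) (ph : Nat) =>
    (List.range p.toNat).foldl (fun (ps : Array Int) (pw : Nat) =>
      (List.range 8192).foldl (fun (ps : Array Int) (i : Nat) =>
        ps.setIfInBounds i
          (ps.getD i 0 + slots.getD (((i : Int) + ((ph : Int) * w + (pw : Int))) % 8192).toNat 0)) ps) ps)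
    (Array.replicate 8192 0)

-- Python's pool_sum[src_idx] for -8192 ≤ src_idx < 8192 (negative wraps) is ported as
-- pool_sum[(src_idx % 8192).toNat]; for src_idx < -8192 Python raises IndexError (outside Pre_).
def avgpool_cyclic (input_flat : List Int) (input_h : Int) (input_w : Int) (pool_size : Int) (stride : Int) : List Int × Int × Int :=
  let out_h := PySem.Int.floordiv (input_h - pool_size) stride + 1
  let out_w := PySem.Int.floordiv (input_w - pool_size) stride + 1
  let pool_area := pool_size * pool_size
  let slots := pvSlotsA input_flat
  let pool_sum := pvPoolSum slots input_w pool_size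
  let output := (List.range out_h.toNat).foldl (fun (o : Array Int) (oh : Nat) =>
    (List.range out_w.toNat).foldl (fun (o : Array Int) (ow : Nat) =>
      let src := ((oh : Int) * stride) * input_w + (ow : Int) * stride
      if src < 8192 then
        o.setIfInBounds ((oh : Int) * out_w + (ow : Int)).toNat
          (PySem.Int.floordiv (pool_sum.getD (src % 8192).toNat 0) pool_area)
      else o) o)
    (Array.replicate (out_h * out_w).toNat 0)
  (output.toList, out_h, out_w)

-- ===== PORT B =====
-- def slot(i): j = i % 8192; return input_flat[j] if j < n else 0
def pvSlot (input_flat : List Int) (i : Int) : Int :=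
  let j := (i % 8192).toNat
  if j < input_flat.length then input_flat.getD j 0 else 0

-- window = [slot(src + ph*input_w + pw) for ph in range(pool_size) for pw in range(pool_size)]
def pvWindowList (input_flat : List Int) (w : Int) (p : Int) (src : Int) : List Int :=
  (List.range p.toNat).flatMap (fun (ph : Nat) =>
    (List.range p.toNat).map (fun (pw : Nat) =>
      pvSlot input_flat (src + (ph : Int) * w + (pw : Int))))

-- def cell(oh, ow): …  return 0 if src >= 8192 else sum(window) // area
def pvCell (input_flat : List Int) (w : Int) (p : Int) (stride : Int) (area : Int) (oh : Nat) (ow : Nat) : Int :=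
  let src := (oh : Int) * stride * w + (ow : Int) * stride
  if 8192 ≤ src then 0
  else PySem.Int.floordiv (pvWindowList input_flat w p src).sum area

def avgpool_cyclic_alt (input_flat : List Int) (input_h : Int) (input_w : Int) (pool_size : Int) (stride : Int) : List Int × Int × Int :=
  let out_h := PySem.Int.floordiv (input_h - pool_size) stride + 1
  let out_w := PySem.Int.floordiv (input_w - pool_size) stride + 1
  let area := pool_size * pool_size
  let output := (List.range out_h.toNat).flatMap (fun oh =>
    (List.range out_w.toNat).map (fun ow =>
      pvCell input_flat input_w pool_size stride area oh ow))
  (output, out_h, out_w)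

-- ===== PRECONDITION & SPEC =====
-- Pre_ excludes exactly the inputs where Python A raises: stride = 0 (ZeroDivisionError),
-- pool_size = 0 with a nonempty output grid (ZeroDivisionError at the first pooled cell),
-- and grids whose most negative source index is below -8192 (IndexError; the minimum of the
-- bilinear index stride*(oh*input_w + ow) over the output grid is attained at a corner).
-- (The Lean ports totalize exactly these raising points — floordiv at 0, modular wrap — and
-- happen to agree even there, so the equivalence proof below holds without consuming Pre_;
-- Pre_ is what makes each port faithful to ITS Python.)
def Pre_avgpool_cyclic (input_flat : List Int) (input_h : Int) (input_w : Int) (pool_size : Int) (stride : Int) : Prop :=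
  stride ≠ 0 ∧
  (PySem.Int.floordiv (input_h - pool_size) stride + 1 ≤ 0 ∨
   PySem.Int.floordiv (input_w - pool_size) stride + 1 ≤ 0 ∨
   (pool_size ≠ 0 ∧
    -8192 ≤ stride * (PySem.Int.floordiv (input_h - pool_size) stride * input_w) ∧
    -8192 ≤ stride * PySem.Int.floordiv (input_w - pool_size) stride ∧
    -8192 ≤ stride * (PySem.Int.floordiv (input_h - pool_size) stride * input_w
                      + PySem.Int.floordiv (input_w - pool_size) stride)))
instance (input_flat : List Int) (input_h : Int) (input_w : Int) (pool_size : Int) (stride : Int) : Decidable (Pre_avgpool_cyclic input_flat input_h input_w pool_size stride) := by unfold Pre_avgpool_cyclic; infer_instance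

def pvWitness_avgpool_cyclic : List Int × Int × Int × Int × Int := ([1, 2, 3, 4], 2, 2, 2, 1)

-- On inputs where both computed output dimensions are negative (out_h<0 and out_w<0), A returns a
-- list of out_h*out_w zeros — an accident of allocating [0]*(out_h*out_w) with a positive product
-- of two negative dims while its fill loops never run — whereas B returns the empty list, the
-- intended output for an empty output grid.
def D_avgpool_cyclic (input_flat : List Int) (input_h : Int) (input_w : Int) (pool_size : Int) (stride : Int) : Prop :=
  Int.fdiv (input_h - pool_size) stride < -1 ∧ Int.fdiv (input_w - pool_size) stride < -1
instance (input_flat : List Int) (input_h : Int) (input_w : Int) (pool_size : Int) (stride : Int) : Decidable (D_avgpool_cyclic input_flat input_h input_w pool_size stride) := by unfold D_avgpool_cyclic; infer_instance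

def Spec_avgpool_cyclic (input_flat : List Int) (input_h : Int) (input_w : Int) (pool_size : Int) (stride : Int) (out : List Int × Int × Int) : Prop := ¬ D_avgpool_cyclic input_flat input_h input_w pool_size stride → out = avgpool_cyclic_alt input_flat input_h input_w pool_size stride
instance (input_flat : List Int) (input_h : Int) (input_w : Int) (pool_size : Int) (stride : Int) (out : List Int × Int × Int) : Decidable (Spec_avgpool_cyclic input_flat input_h input_w pool_size stride out) := by unfold Spec_avgpool_cyclic; infer_instance

def pvDiffWitness_avgpool_cyclic : List Int × Int × Int × Int × Int := ([], -2, -2, 0, 1)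
def pvDiffWitnessOut_avgpool_cyclic : (List Int × Int × Int) × (List Int × Int × Int) := (([0], -1, -1), ([], -1, -1))

-- ===== CLAIM (what is proved, stated in full; the proofs are below) =====
def Claim_unchanged_avgpool_cyclic : Prop := ∀ (input_flat : List Int) (input_h : Int) (input_w : Int) (pool_size : Int) (stride : Int), Dom_avgpool_cyclic input_flat input_h input_w pool_size stride → Pre_avgpool_cyclic input_flat input_h input_w pool_size stride → Spec_avgpool_cyclic input_flat input_h input_w pool_size stride (avgpool_cyclic input_flat input_h input_w pool_size stride)
def Claim_changed_avgpool_cyclic : Prop := Dom_avgpool_cyclic (pvDiffWitness_avgpool_cyclic.1) (pvDiffWitness_avgpool_cyclic.2.1) (pvDiffWitness_avgpool_cyclic.2.2.1) (pvDiffWitness_avgpool_cyclic.2.2.2.1) (pvDiffWitness_avgpool_cyclic.2.2.2.2) ∧ Pre_avgpool_cyclic (pvDiffWitness_avgpool_cyclic.1) (pvDiffWitness_avgpool_cyclic.2.1) (pvDiffWitness_avgpool_cyclic.2.2.1) (pvDiffWitness_avgpool_cyclic.2.2.2.1) (pvDiffWitness_avgpool_cyclic.2.2.2.2) ∧ D_avgpool_cyclic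 (pvDiffWitness_avgpool_cyclic.1) (pvDiffWitness_avgpool_cyclic.2.1) (pvDiffWitness_avgpool_cyclic.2.2.1) (pvDiffWitness_avgpool_cyclic.2.2.2.1) (pvDiffWitness_avgpool_cyclic.2.2.2.2) ∧ avgpool_cyclic (pvDiffWitness_avgpool_cyclic.1) (pvDiffWitness_avgpool_cyclic.2.1) (pvDiffWitness_avgpool_cyclic.2.2.1) (pvDiffWitness_avgpool_cyclic.2.2.2.1) (pvDiffWitness_avgpool_cyclic.2.2.2.2) = pvDiffWitnessOut_avgpool_cyclic.1 ∧ avgpool_cyclic_alt (pvDiffWitness_avgpool_cyclic.1) (pvDiffWitness_avgpool_cyclic.2.1) (pvDiffWitness_avgpool_cyclic.2.2.1) (pvDiffWitness_avgpool_cyclic.2.2.2.1) (pvDiffWitness_avgpool_cyclic.2.2.2.2) = pvDiffWitnessOut_avgpool_cyclic.2 ∧ pvDiffWitnessOut_avgpool_cyclic.1 ≠ pvDiffWitnessOut_avgpool_cyclic.2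
def Claim_exact_avgpool_cyclic : Prop := ∀ (input_flat : List Int) (input_h : Int) (input_w : Int) (pool_size : Int) (stride : Int), Dom_avgpool_cyclic input_flat input_h input_w pool_size stride → Pre_avgpool_cyclic input_flat input_h input_w pool_size stride → D_avgpool_cyclic input_flat input_h input_w pool_size stride → avgpool_cyclic input_flat input_h input_w pool_size stride ≠ avgpool_cyclic_alt input_flat input_h input_w pool_size stride

-- ===== LEMMAS AND PROOFS =====

-- getD after setIfInBounds
theorem pv_getD_set (a : Array Int) (i j : Nat) (v : Int) :
    (a.setIfInBounds i v).getD j 0 = if i = j ∧ i < a.size then v else a.getD j 0 := by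
  rw [Array.getD_eq_getD_getElem?, Array.getElem?_setIfInBounds, Array.getD_eq_getD_getElem?]
  by_cases h1 : i = j
  · subst h1
    by_cases h2 : i < a.size
    · simp [h2]
    · simp [h2]
  · simp [h1]

-- a fold whose steps preserve size preserves size
theorem pv_size_pres (F : Array Int → Nat → Array Int) (h : ∀ ps x, (F ps x).size = ps.size)
    (l : List Nat) (a : Array Int) : (l.foldl F a).size = a.size := by
  induction l generalizing a with
  | nil => rfl
  | cons x xs ih => rw [List.foldl_cons, ih, h]

-- one full pass pool_sum[i] += g i over range n
theorem pv_pass_getD (g : Nat → Int) (a : Array Int) :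
    ∀ n : Nat, n ≤ a.size → ∀ j : Nat,
      ((List.range n).foldl (fun ps i => ps.setIfInBounds i (ps.getD i 0 + g i)) a).getD j 0
        = if j < n then a.getD j 0 + g j else a.getD j 0 := by
  intro n
  induction n with
  | zero => simp
  | succ m ih =>
    intro hn j
    have hm : m ≤ a.size := Nat.le_of_succ_le hn
    rw [List.range_succ, List.foldl_append]
    simp only [List.foldl_cons, List.foldl_nil]
    rw [pv_getD_set,
        pv_size_pres (fun ps i => ps.setIfInBounds i (ps.getD i 0 + g i))
          (fun ps i => Array.size_setIfInBounds) (List.range m) a]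
    by_cases hj : m = j
    · subst hj
      rw [if_pos ⟨rfl, by omega⟩, ih hm m, if_neg (by omega), if_pos (by omega)]
    · rw [if_neg (by tauto), ih hm j]
      by_cases h2 : j < m
      · rw [if_pos h2, if_pos (by omega)]
      · rw [if_neg h2, if_neg (by omega)]

-- a fold of whole-array passes, each adding c x j to slot j, accumulates the scalar fold
theorem pv_fold_accum (F : Array Int → Nat → Array Int) (c : Nat → Nat → Int) (l : List Nat)
    (hsz : ∀ ps x, (F ps x).size = ps.size)
    (hst : ∀ ps x, ps.size = 8192 → ∀ j, j < 8192 → (F ps x).getD j 0 = ps.getD j 0 + c x j)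
    (a : Array Int) (ha : a.size = 8192) (j : Nat) (hj : j < 8192) :
    (l.foldl F a).getD j 0 = a.getD j 0 + l.foldl (fun t x => t + c x j) 0 := by
  induction l generalizing a with
  | nil => simp
  | cons x xs ih =>
    simp only [List.foldl_cons]
    have ha' : (F a x).size = 8192 := by rw [hsz, ha]
    rw [ih (F a x) ha', hst a x ha j hj]
    simp only [PySem.List.foldl_add, zero_add]
    ring

-- proof-side name for A's double accumulation read off at one slot
def pvWindowFold (slots : Array Int) (w : Int) (p : Int) (src : Int) : Int :=
  (List.range p.toNat).foldl (fun (t : Int) (ph : Nat) =>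
    (List.range p.toNat).foldl (fun (t : Int) (pw : Nat) =>
      t + slots.getD (((src + (ph : Int) * w) + (pw : Int)) % 8192).toNat 0) t) 0

-- the A-side pool_sum slot j equals the double window fold at source index j
theorem pv_poolsum_spec (slots : Array Int) (w p : Int) (j : Nat) (hj : j < 8192) :
    (pvPoolSum slots w p).getD j 0 = pvWindowFold slots w p (j : Int) := by
  unfold pvPoolSum pvWindowFold
  rw [pv_fold_accum
    (fun (ps : Array Int) (ph : Nat) => (List.range p.toNat).foldl (fun (ps : Array Int) (pw : Nat) =>
      (List.range 8192).foldl (fun (ps : Array Int) (i : Nat) =>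
        ps.setIfInBounds i
          (ps.getD i 0 + slots.getD (((i : Int) + ((ph : Int) * w + (pw : Int))) % 8192).toNat 0)) ps) ps)
    (fun (ph : Nat) (j : Nat) => (List.range p.toNat).foldl (fun (t : Int) (pw : Nat) =>
      t + slots.getD (((j : Int) + ((ph : Int) * w + (pw : Int))) % 8192).toNat 0) 0)
    (List.range p.toNat)
    (fun ps ph => pv_size_pres _ (fun ps pw => pv_size_pres _
      (fun ps i => Array.size_setIfInBounds) _ _) _ _)
    (fun ps ph hps j hj => by
      rw [pv_fold_accum
        (fun (ps : Array Int) (pw : Nat) => (List.range 8192).foldl (fun (ps : Array Int) (i : Nat) =>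
          ps.setIfInBounds i
            (ps.getD i 0 + slots.getD (((i : Int) + ((ph : Int) * w + (pw : Int))) % 8192).toNat 0)) ps)
        (fun (pw : Nat) (j : Nat) => slots.getD (((j : Int) + ((ph : Int) * w + (pw : Int))) % 8192).toNat 0)
        (List.range p.toNat)
        (fun ps pw => pv_size_pres _ (fun ps i => Array.size_setIfInBounds) _ _)
        (fun ps pw hps j hj => by
          rw [pv_pass_getD _ ps 8192 (by omega) j, if_pos hj])
        ps hps j hj])
    (Array.replicate 8192 0) (by simp) j hj]
  simp only [Array.getD_eq_getD_getElem?, Array.getElem?_replicate, if_pos hj, Option.getD_some,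
    zero_add]
  simp only [PySem.List.foldl_add, zero_add, add_assoc]

-- the double window fold only depends on src modulo 8192
theorem pv_windowFold_mod (slots : Array Int) (w p : Int) (src : Int) :
    pvWindowFold slots w p (src % 8192) = pvWindowFold slots w p src := by
  unfold pvWindowFold
  refine PySem.List.foldl_congr_mem _ _ _ _ ?_
  intro t ph _
  refine PySem.List.foldl_congr_mem _ _ _ _ ?_
  intro t pw _
  have h : ((src % 8192 + (ph : Int) * w) + (pw : Int)) % 8192
       = ((src + (ph : Int) * w) + (pw : Int)) % 8192 := by omega
  rw [h]

-- getD of a fold assigning f i at index i over range n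
theorem pv_setfold_getD (f : Nat → Int) (a : Array Int) :
    ∀ n : Nat, n ≤ a.size → ∀ j : Nat,
      ((List.range n).foldl (fun ps i => ps.setIfInBounds i (f i)) a).getD j 0
        = if j < n then f j else a.getD j 0 := by
  intro n
  induction n with
  | zero => simp
  | succ m ih =>
    intro hn j
    have hm : m ≤ a.size := Nat.le_of_succ_le hn
    rw [List.range_succ, List.foldl_append]
    simp only [List.foldl_cons, List.foldl_nil]
    rw [pv_getD_set,
        pv_size_pres (fun ps i => ps.setIfInBounds i (f i))
          (fun ps i => Array.size_setIfInBounds) (List.range m) a]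
    by_cases hj : m = j
    · subst hj
      rw [if_pos ⟨rfl, by omega⟩, if_pos (by omega)]
    · rw [if_neg (by tauto), ih hm j]
      by_cases h2 : j < m
      · rw [if_pos h2, if_pos (by omega)]
      · rw [if_neg h2, if_neg (by omega)]

-- characterisation of A's slots vector
theorem pv_slotsA_getD (input_flat : List Int) (j : Nat) (hj : j < 8192) :
    (pvSlotsA input_flat).getD j 0
      = if j < min input_flat.length 8192 then input_flat.getD j 0 else 0 := by
  unfold pvSlotsA
  rw [pv_setfold_getD (fun i => input_flat.getD i 0) (Array.replicate 8192 0)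
        (min input_flat.length 8192) (by simp) j]
  simp only [Array.getD_eq_getD_getElem?, Array.getElem?_replicate, if_pos hj, Option.getD_some]

-- B's slot function reads A's slots vector at the wrapped index
theorem pv_slot_eq (input_flat : List Int) (i : Int) :
    pvSlot input_flat i = (pvSlotsA input_flat).getD ((i % 8192).toNat) 0 := by
  have hb : (i % 8192).toNat < 8192 := by omega
  rw [pv_slotsA_getD input_flat _ hb]
  unfold pvSlot
  by_cases h : (i % 8192).toNat < input_flat.length
  · rw [if_pos h, if_pos (by omega)]
  · rw [if_neg h, if_neg (by omega)]

-- a double accumulation fold is the sum of the row sums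
theorem pv_doublefold_sum (L1 L2 : List Nat) (g : Nat → Nat → Int) :
    L1.foldl (fun (t : Int) (ph : Nat) => L2.foldl (fun (t : Int) (pw : Nat) => t + g ph pw) t) 0
      = (L1.map (fun ph => (L2.map (g ph)).sum)).sum := by
  induction L1 using List.reverseRecOn with
  | nil => simp
  | append_singleton l ph ih =>
    rw [List.foldl_append, List.map_append, List.sum_append]
    simp only [List.foldl_cons, List.foldl_nil, List.map_cons, List.map_nil, List.sum_cons,
      List.sum_nil]
    rw [ih, PySem.List.foldl_add]
    ring

-- B's window list sums to the double window fold
theorem pv_window_sum (input_flat : List Int) (w p : Int) (src : Int) :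
    (pvWindowList input_flat w p src).sum = pvWindowFold (pvSlotsA input_flat) w p src := by
  unfold pvWindowList pvWindowFold
  rw [pv_doublefold_sum]
  rw [List.flatMap_def]
  simp only [List.sum_flatten, List.map_map]
  refine congrArg List.sum (List.map_congr_left (fun ph _ => ?_))
  simp only [Function.comp]
  refine congrArg List.sum (List.map_congr_left (fun pw _ => ?_))
  rw [pv_slot_eq]

-- A's pool_sum lookup at a (possibly wrapped) source index is B's window list sum
theorem pv_lookup_eq (input_flat : List Int) (w p : Int) (src : Int) :
    (pvPoolSum (pvSlotsA input_flat) w p).getD (src % 8192).toNat 0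
      = (pvWindowList input_flat w p src).sum := by
  have hb : (src % 8192).toNat < 8192 := by omega
  rw [pv_poolsum_spec _ _ _ _ hb]
  have hc : (((src % 8192).toNat : Nat) : Int) = src % 8192 := Int.toNat_of_nonneg (by omega)
  rw [hc, pv_windowFold_mod, pv_window_sum]

-- folds on arrays commute with toList
theorem pv_foldl_toList (F : Array Int → Nat → Array Int) (G : List Int → Nat → List Int)
    (h : ∀ a x, (F a x).toList = G a.toList x) (l : List Nat) (a : Array Int) :
    (l.foldl F a).toList = l.foldl G a.toList := by
  induction l generalizing a with
  | nil => rfl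
  | cons x xs ih => rw [List.foldl_cons, List.foldl_cons, ih, h]

-- setting just past a prefix
theorem pv_set_at_length (l r : List Int) (x v : Int) :
    (l ++ x :: r).set l.length v = l ++ v :: r := by
  induction l with
  | nil => simp
  | cons y ys ih => simp [ih]

-- one output row written into the zero region after the front
theorem pv_row_set (c : Nat → Prop) [DecidablePred c] (v : Nat → Int) :
    ∀ (W : Nat) (front : List Int) (m : Nat), W ≤ m →
    (List.range W).foldl
        (fun (l : List Int) (ow : Nat) => if c ow then l.set (front.length + ow) (v ow) else l)
        (front ++ List.replicate m 0)
      = front ++ (List.range W).map (fun ow => if c ow then v ow else 0)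
          ++ List.replicate (m - W) 0 := by
  intro W
  induction W with
  | zero => simp
  | succ W ih =>
    intro front m hm
    rw [List.range_succ, List.foldl_append, List.map_append]
    simp only [List.foldl_cons, List.foldl_nil, List.map_cons, List.map_nil]
    rw [ih front m (by omega)]
    have hrep : List.replicate (m - W) (0 : Int) = 0 :: List.replicate (m - (W + 1)) 0 := by
      have : m - W = (m - (W + 1)) + 1 := by omega
      rw [this, List.replicate_succ]
    rw [hrep]
    have hlen : front.length + W
        = (front ++ (List.range W).map (fun ow => if c ow then v ow else 0)).length := by
      simp
    by_cases hc : c W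
    · rw [if_pos hc]
      rw [show front ++ (List.range W).map (fun ow => if c ow then v ow else 0)
            ++ 0 :: List.replicate (m - (W + 1)) 0
          = (front ++ (List.range W).map (fun ow => if c ow then v ow else 0))
            ++ 0 :: List.replicate (m - (W + 1)) 0 by simp]
      rw [hlen, pv_set_at_length]
      simp [hc]
    · rw [if_neg hc]
      simp [hc]

-- the whole conditional grid fold, on lists
theorem pv_grid (c : Nat → Nat → Prop) [∀ oh ow, Decidable (c oh ow)] (v : Nat → Nat → Int) (W : Nat) :
    ∀ (H S : Nat), H * W ≤ S →
    (List.range H).foldl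
        (fun (l : List Int) (oh : Nat) =>
          (List.range W).foldl
            (fun (l : List Int) (ow : Nat) =>
              if c oh ow then l.set (oh * W + ow) (v oh ow) else l) l)
        (List.replicate S 0)
      = (List.range H).flatMap
          (fun oh => (List.range W).map (fun ow => if c oh ow then v oh ow else 0))
          ++ List.replicate (S - H * W) 0 := by
  intro H
  induction H with
  | zero => simp
  | succ H ih =>
    intro S hS
    rw [List.range_succ, List.foldl_append, List.flatMap_append]
    simp only [List.foldl_cons, List.foldl_nil, List.flatMap_cons, List.flatMap_nil,
      List.append_nil]
    have hmul : H * W + W = (H + 1) * W := by ring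
    rw [ih S (by omega)]
    have hlen : ((List.range H).flatMap
        (fun oh => (List.range W).map (fun ow => if c oh ow then v oh ow else 0))).length
        = H * W := by
      rw [List.length_flatMap]
      simp [Function.comp, Nat.mul_comm]
    rw [show (fun (l : List Int) (ow : Nat) =>
          if c H ow then l.set (H * W + ow) (v H ow) else l)
        = (fun (l : List Int) (ow : Nat) =>
          if c H ow then l.set (((List.range H).flatMap
            (fun oh => (List.range W).map (fun ow => if c oh ow then v oh ow else 0))).length + ow)
            (v H ow) else l) by rw [hlen]]
    rw [pv_row_set (c H) (v H) W _ (S - H * W) (by omega)]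
    simp only [List.append_assoc]
    have hcnt : S - H * W - W = S - (H + 1) * W := by omega
    rw [hcnt]

-- a fold that does nothing
theorem pv_foldl_id {A B : Type} (l : List B) (a : A) :
    l.foldl (fun (x : A) (_ : B) => x) a = a := by
  induction l generalizing a with
  | nil => rfl
  | cons x xs ih => simpa using ih

-- core of the equivalence: A's array-building output loop, read as a list, is B's flat comprehension
theorem pv_main (input_flat : List Int) (input_w pool_size stride area : Int) (OH OW : Int)
    (hnD : ¬ (OH < 0 ∧ OW < 0)) :
    ((List.range OH.toNat).foldl
      (fun (o : Array Int) (oh : Nat) =>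
        (List.range OW.toNat).foldl
          (fun (o : Array Int) (ow : Nat) =>
            if (oh : Int) * stride * input_w + (ow : Int) * stride < 8192 then
              o.setIfInBounds ((oh : Int) * OW + (ow : Int)).toNat
                (PySem.Int.floordiv ((pvPoolSum (pvSlotsA input_flat) input_w pool_size).getD
                  (((oh : Int) * stride * input_w + (ow : Int) * stride) % 8192).toNat 0) area)
            else o) o)
      (Array.replicate (OH * OW).toNat 0)).toList
    = (List.range OH.toNat).flatMap (fun oh =>
        (List.range OW.toNat).map (fun ow =>
          pvCell input_flat input_w pool_size stride area oh ow)) := by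
  by_cases h0 : 0 ≤ OW
  · -- the grid case: move to lists, canonicalize the write index, apply the grid lemma
    have hOW : OW = ((OW.toNat : Nat) : Int) := (Int.toNat_of_nonneg h0).symm
    rw [pv_foldl_toList _
      (fun (l : List Int) (oh : Nat) =>
        (List.range OW.toNat).foldl
          (fun (l : List Int) (ow : Nat) =>
            if (oh : Int) * stride * input_w + (ow : Int) * stride < 8192 then
              l.set ((oh : Int) * OW + (ow : Int)).toNat
                (PySem.Int.floordiv ((pvPoolSum (pvSlotsA input_flat) input_w pool_size).getD
                  (((oh : Int) * stride * input_w + (ow : Int) * stride) % 8192).toNat 0) area)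
            else l) l)
      (fun a oh => pv_foldl_toList _ _
        (fun a ow => by
          split
          · exact Array.toList_setIfInBounds
          · rfl) _ _)]
    rw [Array.toList_replicate]
    rw [PySem.List.foldl_congr_mem _ _
      (fun (l : List Int) (oh : Nat) =>
        (List.range OW.toNat).foldl
          (fun (l : List Int) (ow : Nat) =>
            if (oh : Int) * stride * input_w + (ow : Int) * stride < 8192 then
              l.set (oh * OW.toNat + ow)
                (PySem.Int.floordiv ((pvPoolSum (pvSlotsA input_flat) input_w pool_size).getD
                  (((oh : Int) * stride * input_w + (ow : Int) * stride) % 8192).toNat 0) area)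
            else l) l)
      _
      (fun l oh _ => PySem.List.foldl_congr_mem _ _ _ _
        (fun l' ow _ => by
          have h2 : ((oh * OW.toNat + ow : Nat) : Int) = (oh : Int) * OW + (ow : Int) := by
            push_cast [Int.toNat_of_nonneg h0]
            ring
          have hidx : ((oh : Int) * OW + (ow : Int)).toNat = oh * OW.toNat + ow := by
            rw [← h2, Int.toNat_natCast]
          rw [hidx]))]
    have hkey : (OH * OW).toNat = OH.toNat * OW.toNat := by
      by_cases hOH : 0 ≤ OH
      · have h2 : ((OH.toNat * OW.toNat : Nat) : Int) = OH * OW := by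
          push_cast [Int.toNat_of_nonneg hOH, Int.toNat_of_nonneg h0]
          ring
        rw [← h2, Int.toNat_natCast]
      · have hH0 : OH.toNat = 0 := Int.toNat_of_nonpos (by omega)
        have hprod : OH * OW ≤ 0 := by nlinarith
        rw [hH0, Int.toNat_of_nonpos hprod]
        simp
    rw [pv_grid
      (fun oh ow => (oh : Int) * stride * input_w + (ow : Int) * stride < 8192)
      (fun oh ow =>
        PySem.Int.floordiv ((pvPoolSum (pvSlotsA input_flat) input_w pool_size).getD
          (((oh : Int) * stride * input_w + (ow : Int) * stride) % 8192).toNat 0) area)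
      OW.toNat OH.toNat ((OH * OW).toNat) (by omega)]
    have htail : (OH * OW).toNat - OH.toNat * OW.toNat = 0 := by omega
    rw [htail]
    simp only [List.replicate_zero, List.append_nil]
    rw [List.flatMap_def, List.flatMap_def]
    refine congrArg List.flatten (List.map_congr_left (fun oh _ => ?_))
    refine List.map_congr_left (fun ow _ => ?_)
    unfold pvCell
    simp only []
    by_cases hc : (oh : Int) * stride * input_w + (ow : Int) * stride < 8192
    · rw [if_pos hc, if_neg (not_le.mpr hc), pv_lookup_eq]
    · rw [if_neg hc, if_pos (not_lt.mp hc)]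
  · -- degenerate case: out_w < 0 forces out_h ≥ 0, so the output grid is empty on both sides
    have hOH : 0 ≤ OH := by
      by_contra h
      exact hnD ⟨by omega, by omega⟩
    have hW0 : OW.toNat = 0 := Int.toNat_of_nonpos (by omega)
    have hprod : OH * OW ≤ 0 := by nlinarith
    have hS0 : (OH * OW).toNat = 0 := Int.toNat_of_nonpos hprod
    rw [hW0, hS0]
    simp only [List.range_zero, List.foldl_nil, List.map_nil]
    rw [pv_foldl_id]
    simp

-- the two ports agree whenever out_h and out_w are not both negative
theorem pv_ports_eq (input_flat : List Int) (input_h input_w pool_size stride : Int)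
    (hnD : ¬ (PySem.Int.floordiv (input_h - pool_size) stride + 1 < 0 ∧
              PySem.Int.floordiv (input_w - pool_size) stride + 1 < 0)) :
    avgpool_cyclic input_flat input_h input_w pool_size stride
      = avgpool_cyclic_alt input_flat input_h input_w pool_size stride := by
  unfold avgpool_cyclic avgpool_cyclic_alt
  simp only []
  refine congrArg (fun l => (l, _, _)) ?_
  exact pv_main input_flat input_w pool_size stride (pool_size * pool_size)
    (PySem.Int.floordiv (input_h - pool_size) stride + 1)
    (PySem.Int.floordiv (input_w - pool_size) stride + 1) hnD

-- ===== VERDICT (by name: the statement is the Claim_ definition above) =====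
theorem avgpool_cyclic_spec : Claim_unchanged_avgpool_cyclic := by
  intro input_flat input_h input_w pool_size stride _ _
  unfold Spec_avgpool_cyclic
  intro hnD
  unfold D_avgpool_cyclic at hnD
  have hfd1 : PySem.Int.floordiv (input_h - pool_size) stride
      = Int.fdiv (input_h - pool_size) stride := rfl
  have hfd2 : PySem.Int.floordiv (input_w - pool_size) stride
      = Int.fdiv (input_w - pool_size) stride := rfl
  exact pv_ports_eq input_flat input_h input_w pool_size stride
    (fun ⟨a, b⟩ => hnD ⟨by omega, by omega⟩)

theorem avgpool_cyclic_changed : Claim_changed_avgpool_cyclic := by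
  unfold Claim_changed_avgpool_cyclic
  decide

theorem avgpool_cyclic_tight : Claim_exact_avgpool_cyclic := by
  intro input_flat input_h input_w pool_size stride _ _ hD heq
  unfold D_avgpool_cyclic at hD
  obtain ⟨h1', h2'⟩ := hD
  have hfd1 : PySem.Int.floordiv (input_h - pool_size) stride
      = Int.fdiv (input_h - pool_size) stride := rfl
  have hfd2 : PySem.Int.floordiv (input_w - pool_size) stride
      = Int.fdiv (input_w - pool_size) stride := rfl
  have h1 : PySem.Int.floordiv (input_h - pool_size) stride + 1 < 0 := by omega
  have h2 : PySem.Int.floordiv (input_w - pool_size) stride + 1 < 0 := by omega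
  have hprod : 1 ≤ (PySem.Int.floordiv (input_h - pool_size) stride + 1) *
      (PySem.Int.floordiv (input_w - pool_size) stride + 1) := by nlinarith
  have hH0 : (PySem.Int.floordiv (input_h - pool_size) stride + 1).toNat = 0 :=
    Int.toNat_of_nonpos (by omega)
  have hfst := congrArg (fun t : List Int × Int × Int => t.1) heq
  unfold avgpool_cyclic avgpool_cyclic_alt at hfst
  simp only [hH0, List.range_zero, List.foldl_nil, List.flatMap_nil, Array.toList_replicate] at hfst
  have hlen := congrArg List.length hfst
  simp only [List.length_replicate, List.length_nil] at hlen
  omega
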